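-- pv_equiv track=rewrite | github.com/jansoft54/SSTAS | eval/metrics/mstcn_code.py | get_labels_start_end_time
-- ===== SOURCE A (Python) =====
-- def get_labels_start_end_time(frame_wise_labels, ignored_classes=[-100]):
--     labels = []
--     starts = []
--     ends = []
--     last_label = frame_wise_labels[0]
--     if frame_wise_labels[0] not in ignored_classes:
--         labels.append(frame_wise_labels[0])
--         starts.append(0)
--     for i in range(len(frame_wise_labels)):
--         if frame_wise_labels[i] != last_label:
--             if frame_wise_labels[i] not in ignored_classes:
--                 labels.append(frame_wise_labels[i])
--                 starts.append(i)
--             if last_label not in ignored_classes: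
--                 ends.append(i)
--             last_label = frame_wise_labels[i]
--     if last_label not in ignored_classes:
--         ends.append(i + 1)
--     return labels, starts, ends
-- ===== SOURCE B (Python) =====
-- def get_labels_start_end_time(frame_wise_labels, ignored_classes=[-100]):
--     fw = frame_wise_labels
--     # stage 1: every segment start paired with its label (boundary where a frame differs from its predecessor)
--     seg_starts = [(0, fw[0])] + [(i, b) for i, (a, b) in enumerate(zip(fw, fw[1:]), 1) if a != b]
--     # stage 2: each segment ends where the next one starts; the last ends at len(fw)
--     seg_ends = [i for i, _ in seg_starts[1:]] + [len(fw)]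
--     # stage 3: filter out ignored classes
--     labels, starts, ends = [], [], []
--     for (s, lab), e in zip(seg_starts, seg_ends):
--         if lab not in ignored_classes:
--             labels.append(lab)
--             starts.append(s)
--             ends.append(e)
--     return labels, starts, ends
-- ===== Notes on version B (the rewrite author's own statement) =====
-- stated objective: alternative
-- what changed: Replaces A's single streaming pass with a last_label state machine by staged passes: detect every segment start by zipping the list with its one-shifted self, align each start with the next boundary to get its end, then filter out ignored classes.
import Mathlib
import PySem

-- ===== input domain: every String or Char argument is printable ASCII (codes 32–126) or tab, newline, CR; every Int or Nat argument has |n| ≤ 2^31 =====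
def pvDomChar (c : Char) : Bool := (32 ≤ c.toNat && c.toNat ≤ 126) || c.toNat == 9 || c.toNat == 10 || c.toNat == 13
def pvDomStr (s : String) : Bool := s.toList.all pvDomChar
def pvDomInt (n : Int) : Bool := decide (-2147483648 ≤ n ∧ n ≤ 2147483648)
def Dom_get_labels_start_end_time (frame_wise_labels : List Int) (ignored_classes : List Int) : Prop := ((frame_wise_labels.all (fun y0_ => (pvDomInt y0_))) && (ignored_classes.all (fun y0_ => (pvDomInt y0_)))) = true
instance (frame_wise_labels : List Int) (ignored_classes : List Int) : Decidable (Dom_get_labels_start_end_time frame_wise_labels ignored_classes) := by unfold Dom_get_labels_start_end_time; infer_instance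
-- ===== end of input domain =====

-- B replaces A's streaming last_label state machine by staged passes: detect all segment
-- boundaries by zipping the list with its shifted self, align each start with the next
-- boundary as its end, then filter ignored classes (alternative decomposition; same cost).

-- ===== PORT A =====
-- enumeration of the list with its indices, starting at k (for i in range(len(..)) with fw[i])
def pvEnumF (k : Nat) : List Int → List (Nat × Int)
  | [] => []
  | x :: xs => (k, x) :: pvEnumF (k + 1) xs

-- A's loop: state (labels, starts, ends, last_label, i); i is the Python loop variable, overwritten every iteration
def pvLoopA (ign : List Int) : List (Nat × Int) → List Int → List Int → List Int → Int → Int → List Int × List Int × List Int × Int × Int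
  | [], L, S, E, last, i => (L, S, E, last, i)
  | (idx, x) :: rest, L, S, E, last, _ =>
      if x ≠ last then
        pvLoopA ign rest
          (if x ∈ ign then L else L ++ [x])
          (if x ∈ ign then S else S ++ [(idx : Int)])
          (if last ∈ ign then E else E ++ [(idx : Int)])
          x (idx : Int)
      else
        pvLoopA ign rest L S E last (idx : Int)

def get_labels_start_end_time (frame_wise_labels : List Int) (ignored_classes : List Int) : List Int × List Int × List Int :=
  match frame_wise_labels with
  | [] => ([], [], [])  -- unreachable under Pre_ (Python raises IndexError reading the first element)
  | x :: _ =>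
    let labels : List Int := if x ∈ ignored_classes then [] else [x]
    let starts : List Int := if x ∈ ignored_classes then [] else [(0 : Int)]
    let r := pvLoopA ignored_classes (pvEnumF 0 frame_wise_labels) labels starts [] x 0
    (r.1, r.2.1, if r.2.2.2.1 ∈ ignored_classes then r.2.2.1 else r.2.2.1 ++ [r.2.2.2.2 + 1])

-- ===== PORT B =====
-- stage-1 comprehension: [(i, b) for i, (a, b) in enumerate(zip(fw, fw[1:]), 1) if a != b]
def pvMid (k : Int) : List (Int × Int) → List (Int × Int)
  | [] => []
  | (a, b) :: ps => if a ≠ b then (k, b) :: pvMid (k + 1) ps else pvMid (k + 1) ps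

-- stage-3 loop: for (s, lab), e in zip(seg_starts, seg_ends): append unless ignored
def pvLoopB (ign : List Int) : List ((Int × Int) × Int) → List Int × List Int × List Int
  | [] => ([], [], [])
  | ((s, lab), e) :: r =>
      let t := pvLoopB ign r
      if lab ∈ ign then t else (lab :: t.1, s :: t.2.1, e :: t.2.2)

def get_labels_start_end_time_alt (frame_wise_labels : List Int) (ignored_classes : List Int) : List Int × List Int × List Int :=
  -- fw[0] is in range on every input Pre_ admits (nonempty); the .getD 0 default is never taken there
  let seg_starts : List (Int × Int) :=
    ((0 : Int), (PySem.List.pyGet? frame_wise_labels 0).getD 0)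
      :: pvMid 1 (List.zip frame_wise_labels (PySem.List.slice frame_wise_labels (some 1) none))
  let seg_ends : List Int := (seg_starts.drop 1).map Prod.fst ++ [(frame_wise_labels.length : Int)]
  pvLoopB ignored_classes (List.zip seg_starts seg_ends)

-- ===== PRECONDITION & SPEC =====
-- Pre_ excludes exactly the empty list, on which both Pythons raise IndexError reading the first element.
def Pre_get_labels_start_end_time (frame_wise_labels : List Int) (ignored_classes : List Int) : Prop :=
  frame_wise_labels ≠ []
instance (frame_wise_labels : List Int) (ignored_classes : List Int) : Decidable (Pre_get_labels_start_end_time frame_wise_labels ignored_classes) := by unfold Pre_get_labels_start_end_time; infer_instance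

def pvWitness_get_labels_start_end_time : List Int × List Int := ([1, 1, 2, -100, 2], [-100])

def Spec_get_labels_start_end_time (frame_wise_labels : List Int) (ignored_classes : List Int) (out : List Int × List Int × List Int) : Prop := out = get_labels_start_end_time_alt frame_wise_labels ignored_classes
instance (frame_wise_labels : List Int) (ignored_classes : List Int) (out : List Int × List Int × List Int) : Decidable (Spec_get_labels_start_end_time frame_wise_labels ignored_classes out) := by unfold Spec_get_labels_start_end_time; infer_instance

-- ===== CLAIM (what is proved, stated in full; the proofs are below) =====
def Claim_equal_get_labels_start_end_time : Prop := ∀ (frame_wise_labels : List Int) (ignored_classes : List Int), Dom_get_labels_start_end_time frame_wise_labels ignored_classes → Pre_get_labels_start_end_time frame_wise_labels ignored_classes → Spec_get_labels_start_end_time frame_wise_labels ignored_classes (get_labels_start_end_time frame_wise_labels ignored_classes)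

-- ===== LEMMAS AND PROOFS =====

-- proof-side canonical form: the maximal runs of the list as (key, length) pairs …
def pvGroups : List Int → List (Int × Nat)
  | [] => []
  | x :: xs =>
      match pvGroups xs with
      | [] => [(x, 1)]
      | (y, c) :: rest => if x == y then (x, c + 1) :: rest else (x, 1) :: (y, c) :: rest

-- … and the segment triples they induce, with a running offset
def pvEmit (ign : List Int) : List (Int × Nat) → Int → List Int × List Int × List Int
  | [], _ => ([], [], [])
  | (key, len) :: gs, pos =>
      let r := pvEmit ign gs (pos + (len : Int))
      if key ∈ ign then r else (key :: r.1, pos :: r.2.1, (pos + (len : Int)) :: r.2.2)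

-- the ((start,key),end) pairs the groups induce
def pvSegPairs : Int → List (Int × Nat) → List ((Int × Int) × Int)
  | _, [] => []
  | pos, (key, len) :: gs => ((pos, key), pos + (len : Int)) :: pvSegPairs (pos + (len : Int)) gs

-- the four state components of pvLoopA that do not depend on the incoming i
def pv4 (r : List Int × List Int × List Int × Int × Int) : List Int × List Int × List Int × Int :=
  (r.1, r.2.1, r.2.2.1, r.2.2.2.1)

lemma pvLoopA_i_irrel (ign : List Int) (l : List (Nat × Int)) : ∀ (L S E : List Int) (last i0 i1 : Int),
    pv4 (pvLoopA ign l L S E last i0) = pv4 (pvLoopA ign l L S E last i1) := by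
  induction l with
  | nil => intro L S E last i0 i1; rfl
  | cons p rest ih =>
      intro L S E last i0 i1
      obtain ⟨idx, x⟩ := p
      by_cases h : x ≠ last
      · simp only [pvLoopA, if_pos h]
      · simp only [pvLoopA, if_neg h]

-- the final value of the Python loop variable i
lemma pvLoopA_i_final (ign : List Int) : ∀ (ys : List Int) (k : Nat) (L S E : List Int) (last i0 : Int),
    (pvLoopA ign (pvEnumF k ys) L S E last i0).2.2.2.2 =
      (if ys.isEmpty then i0 else ((k + ys.length - 1 : Nat) : Int)) := by
  intro ys
  induction ys with
  | nil => intro k L S E last i0; rfl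
  | cons x xs ih =>
      intro k L S E last i0
      by_cases h : x ≠ last
      · simp only [pvEnumF, pvLoopA, if_pos h]
        rw [ih]
        cases xs <;> simp <;> omega
      · simp only [pvEnumF, pvLoopA, if_neg h]
        rw [ih]
        cases xs <;> simp <;> omega

-- a run of elements equal to last is consumed silently (up to the i component)
lemma pvLoopA_skip (ign : List Int) : ∀ (t : List Int) (k : Nat) (l : List (Nat × Int)) (L S E : List Int) (last i0 : Int),
    (∀ x ∈ t, x = last) →
    pv4 (pvLoopA ign (pvEnumF k t ++ l) L S E last i0) = pv4 (pvLoopA ign l L S E last i0) := by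
  intro t
  induction t with
  | nil => intro k l L S E last i0 _; rfl
  | cons x xs ih =>
      intro k l L S E last i0 h
      have hx : x = last := h x (by simp)
      subst hx
      simp only [pvEnumF, List.cons_append, pvLoopA, ne_eq, not_true_eq_false, if_false]
      calc pv4 (pvLoopA ign (pvEnumF (k + 1) xs ++ l) L S E x (k : Int))
        _ = pv4 (pvLoopA ign l L S E x (k : Int)) := ih (k + 1) l L S E x (k : Int) (fun y hy => h y (by simp [hy]))
        _ = pv4 (pvLoopA ign l L S E x i0) := pvLoopA_i_irrel ign l L S E x (k : Int) i0

lemma pvEnumF_append (k : Nat) (a b : List Int) :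
    pvEnumF k (a ++ b) = pvEnumF k a ++ pvEnumF (k + a.length) b := by
  induction a generalizing k with
  | nil => simp [pvEnumF]
  | cons x xs ih => simp [pvEnumF, ih (k + 1)]; ring_nf

-- pvGroups splits off the leading maximal run
lemma pvGroups_cons (x : Int) (xs : List Int) :
    pvGroups (x :: xs) =
      (x, 1 + (xs.takeWhile (fun y => y == x)).length) :: pvGroups (xs.dropWhile (fun y => y == x)) := by
  induction xs generalizing x with
  | nil => simp [pvGroups]
  | cons y ys ih =>
      have hun : pvGroups (x :: y :: ys) =
          (match pvGroups (y :: ys) with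
           | [] => [(x, 1)]
           | (a, c) :: rest => if x == a then (x, c + 1) :: rest else (x, 1) :: (a, c) :: rest) := rfl
      rw [hun, ih y]
      by_cases h : x = y
      · subst h
        simp only [beq_self_eq_true, if_pos, List.takeWhile_cons, List.dropWhile_cons]
        simp [List.cons.injEq, Prod.mk.injEq]
        omega
      · have hb : (y == x) = false := by simp [Ne.symm h]
        simp [hb, h, ih y]

-- the core correspondence for A: A's loop followed by the final ends-append equals pvEmit over the remaining runs
lemma pvMain (ign : List Int) : ∀ (n : Nat) (ys : List Int), ys.length ≤ n → ∀ (k : Nat) (L S E : List Int) (last i0 : Int),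
    ((pvLoopA ign (pvEnumF k ys) L S E last i0).1,
     (pvLoopA ign (pvEnumF k ys) L S E last i0).2.1,
     if (pvLoopA ign (pvEnumF k ys) L S E last i0).2.2.2.1 ∈ ign
       then (pvLoopA ign (pvEnumF k ys) L S E last i0).2.2.1
       else (pvLoopA ign (pvEnumF k ys) L S E last i0).2.2.1 ++ [((k : Int) + ys.length)]) =
    (L ++ (pvEmit ign (pvGroups (ys.dropWhile (fun y => y == last))) ((k : Int) + ((ys.takeWhile (fun y => y == last)).length : Nat))).1,
     S ++ (pvEmit ign (pvGroups (ys.dropWhile (fun y => y == last))) ((k : Int) + ((ys.takeWhile (fun y => y == last)).length : Nat))).2.1,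
     (if last ∈ ign then E else E ++ [((k : Int) + ((ys.takeWhile (fun y => y == last)).length : Nat))]) ++
       (pvEmit ign (pvGroups (ys.dropWhile (fun y => y == last))) ((k : Int) + ((ys.takeWhile (fun y => y == last)).length : Nat))).2.2) := by
  intro n
  induction n with
  | zero =>
      intro ys hys k L S E last i0
      have : ys = [] := List.length_eq_zero_iff.mp (Nat.le_zero.mp hys)
      subst this
      simp only [pvEnumF, pvLoopA, List.takeWhile_nil, List.dropWhile_nil, pvGroups, pvEmit,
        List.length_nil]
      split_ifs <;> simp
  | succ n ih =>
      intro ys hys k L S E last i0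
      have hsplit : ys = ys.takeWhile (fun y => y == last) ++ ys.dropWhile (fun y => y == last) :=
        (List.takeWhile_append_dropWhile).symm
      set t := ys.takeWhile (fun y => y == last) with ht
      set rest := ys.dropWhile (fun y => y == last) with hrest
      have htall : ∀ x ∈ t, x = last := by
        intro x hx
        have := List.mem_takeWhile_imp (ht ▸ hx)
        simpa using this
      cases hre : rest with
      | nil =>
          have hty : t = ys := by rw [hsplit, hre, List.append_nil]
          have hskip := pvLoopA_skip ign t k [] L S E last i0 htall
          simp only [List.append_nil, pvLoopA] at hskip
          rw [hty] at hskip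
          simp only [pv4, Prod.mk.injEq] at hskip
          obtain ⟨h1, h2, h3, h4⟩ := hskip
          have hm : t.length = ys.length := by rw [hty]
          rw [h1, h2, h3, h4]
          simp only [pvGroups, pvEmit, hm]
          split_ifs <;> simp
      | cons z zs =>
          have hz : (z == last) = false := by
            have := List.head?_dropWhile_not (fun y => y == last) ys
            rw [← hrest, hre] at this
            simpa using this
          have hzne : z ≠ last := by simpa using hz
          have henum : pvEnumF k ys = pvEnumF k t ++ ((k + t.length, z) :: pvEnumF (k + t.length + 1) zs) := by
            conv_lhs => rw [hsplit, hre]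
            rw [pvEnumF_append]
            rfl
          have hylen : ys.length = t.length + 1 + zs.length := by
            conv_lhs => rw [hsplit, hre]
            simp
            omega
          have hskip := pvLoopA_skip ign t k (((k + t.length, z)) :: pvEnumF (k + t.length + 1) zs) L S E last i0 htall
          have hstep : pvLoopA ign (((k + t.length, z)) :: pvEnumF (k + t.length + 1) zs) L S E last i0 =
              pvLoopA ign (pvEnumF (k + t.length + 1) zs)
                (if z ∈ ign then L else L ++ [z])
                (if z ∈ ign then S else S ++ [((k + t.length : Nat) : Int)])
                (if last ∈ ign then E else E ++ [((k + t.length : Nat) : Int)])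
                z ((k + t.length : Nat) : Int) := by
            simp [pvLoopA, hzne]
          rw [hstep] at hskip
          rw [henum]
          simp only [pv4, Prod.mk.injEq] at hskip
          obtain ⟨h1, h2, h3, h4⟩ := hskip
          rw [h1, h2, h3, h4]
          have hlen : zs.length ≤ n := by omega
          have hih := ih zs hlen (k + t.length + 1)
            (if z ∈ ign then L else L ++ [z])
            (if z ∈ ign then S else S ++ [((k + t.length : Nat) : Int)])
            (if last ∈ ign then E else E ++ [((k + t.length : Nat) : Int)])
            z ((k + t.length : Nat) : Int)
          simp only [Prod.mk.injEq] at hih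
          obtain ⟨g1, g2, g3⟩ := hih
          have hcast : ((k : Int) + ys.length) = (((k + t.length + 1 : Nat) : Int) + zs.length) := by
            push_cast [hylen]; ring
          rw [hcast, g1, g2, g3]
          rw [pvGroups_cons z zs]
          simp only [pvEmit]
          have hpos : ((k : Int) + (t.length : Nat)) + ((1 + (zs.takeWhile (fun y => y == z)).length : Nat) : Int) =
              (((k + t.length + 1 : Nat) : Int) + ((zs.takeWhile (fun y => y == z)).length : Nat)) := by
            push_cast [List.length_cons]; ring
          by_cases hzi : z ∈ ign <;> by_cases hli : last ∈ ign <;>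
            simp only [hzi, hli, ite_true, ite_false] <;>
            rw [hpos] <;>
            simp [List.append_assoc]

-- A expressed through the canonical run form
lemma pvA_eq_emit (fw ign : List Int) (h : fw ≠ []) :
    get_labels_start_end_time fw ign = pvEmit ign (pvGroups fw) 0 := by
  match fw with
  | [] => exact absurd rfl h
  | x :: xs =>
      simp only [get_labels_start_end_time]
      have h0 : pvEnumF 0 (x :: xs) = (0, x) :: pvEnumF 1 xs := rfl
      rw [h0]
      simp only [pvLoopA, ne_eq, not_true_eq_false, if_false]
      have hi : (pvLoopA ign (pvEnumF 1 xs) (if x ∈ ign then [] else [x])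
          (if x ∈ ign then [] else [(0 : Int)]) [] x ((0 : Nat) : Int)).2.2.2.2 = (xs.length : Int) := by
        rw [pvLoopA_i_final]
        cases xs <;> simp
      have hmain := pvMain ign xs.length xs le_rfl 1 (if x ∈ ign then [] else [x])
        (if x ∈ ign then [] else [(0 : Int)]) [] x ((0 : Nat) : Int)
      simp only [Prod.mk.injEq] at hmain
      obtain ⟨g1, g2, g3⟩ := hmain
      rw [Prod.mk.injEq, Prod.mk.injEq]
      have h01 : (0 : Int) + ((1 + (xs.takeWhile (fun y => y == x)).length : Nat) : Int) =
          (((1 : Nat)) : Int) + ((xs.takeWhile (fun y => y == x)).length : Nat) := by push_cast; ring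
      refine ⟨?_, ?_, ?_⟩
      · rw [g1, pvGroups_cons x xs]
        simp only [pvEmit, h01]
        split_ifs <;> simp
      · rw [g2, pvGroups_cons x xs]
        simp only [pvEmit, h01]
        split_ifs <;> simp
      · rw [hi]
        have hc : (xs.length : Int) + 1 = ((1 : Nat) : Int) + (xs.length : Nat) := by push_cast; ring
        rw [hc, g3, pvGroups_cons x xs]
        simp only [pvEmit, h01]
        split_ifs <;> simp

-- B-side: pvMid over the neighbour pairs of x :: xs splits at the leading run of x
lemma pvMid_zip (k x : Int) (xs : List Int) :
    pvMid k (List.zip (x :: xs) xs) =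
      (match xs.dropWhile (fun y => y == x) with
       | [] => []
       | z :: zs => (k + ((xs.takeWhile (fun y => y == x)).length : Nat), z)
           :: pvMid (k + ((xs.takeWhile (fun y => y == x)).length : Nat) + 1) (List.zip (z :: zs) zs)) := by
  induction xs generalizing x k with
  | nil => simp [pvMid]
  | cons y ys ih =>
      by_cases hxy : x = y
      · subst hxy
        have hz : List.zip (x :: x :: ys) (x :: ys) = (x, x) :: List.zip (x :: ys) ys := rfl
        rw [hz]
        simp only [pvMid, ne_eq, not_true_eq_false, if_false]
        rw [ih (k + 1) x]
        simp only [List.takeWhile_cons, List.dropWhile_cons, beq_self_eq_true, ite_true]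
        cases hd : ys.dropWhile (fun y => y == x) with
        | nil => simp
        | cons z zs =>
            simp only [List.length_cons]
            congr 2 <;> push_cast <;> ring
      · have hz : List.zip (x :: y :: ys) (y :: ys) = (x, y) :: List.zip (y :: ys) ys := rfl
        rw [hz]
        simp only [pvMid, ne_eq, hxy, not_false_iff, if_true]
        have hb : (y == x) = false := by simp [Ne.symm hxy]
        simp [List.takeWhile_cons, List.dropWhile_cons, hb]

-- B-side: the zipped (start,label)/end pairs are exactly the segment pairs of the runs
lemma pvZip_eq_segPairs : ∀ (n : Nat) (xs : List Int), xs.length ≤ n → ∀ (pos x : Int),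
    List.zip ((pos, x) :: pvMid (pos + 1) (List.zip (x :: xs) xs))
      (((pvMid (pos + 1) (List.zip (x :: xs) xs)).map Prod.fst) ++ [pos + (1 + (xs.length : Int))]) =
    pvSegPairs pos (pvGroups (x :: xs)) := by
  intro n
  induction n with
  | zero =>
      intro xs hxs pos x
      have : xs = [] := List.length_eq_zero_iff.mp (Nat.le_zero.mp hxs)
      subst this
      simp [pvMid, pvGroups, pvSegPairs]
  | succ n ih =>
      intro xs hxs pos x
      rw [pvMid_zip, pvGroups_cons]
      set t := xs.takeWhile (fun y => y == x) with ht
      cases hd : xs.dropWhile (fun y => y == x) with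
      | nil =>
          have hty : t = xs := by
            have := List.takeWhile_append_dropWhile (p := fun y => y == x) (l := xs)
            rw [hd, List.append_nil] at this
            rw [ht, this]
          have hlt : (t.length : Int) = (xs.length : Int) := by rw [hty]
          simp only [hd, List.map_nil, List.nil_append, List.zip_cons_cons, List.zip_nil_right,
            pvGroups, pvSegPairs]
          have : pos + (1 + (xs.length : Int)) = pos + ((1 + t.length : Nat) : Int) := by
            push_cast [hlt]; ring
          rw [this]
      | cons z zs =>
          have hsplit : xs = t ++ z :: zs := by
            conv_lhs => rw [← List.takeWhile_append_dropWhile (p := fun y => y == x) (l := xs), hd]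
          have hlen : xs.length = t.length + 1 + zs.length := by rw [hsplit]; simp; omega
          have hzs : zs.length ≤ n := by omega
          have hih := ih zs hzs (pos + 1 + (t.length : Int)) z
          simp only [List.map_cons, List.cons_append, List.zip_cons_cons, pvSegPairs]
          have e2 : pos + (1 + (xs.length : Int)) = pos + 1 + (t.length : Int) + (1 + (zs.length : Int)) := by
            push_cast [hlen]; ring
          have e3 : pos + ((1 + t.length : Nat) : Int) = pos + 1 + (t.length : Int) := by
            push_cast [List.length_cons]; ring
          rw [e2, hih, e3]

-- the filter loop over segment pairs is pvEmit
lemma pvLoopB_eq_emit (ign : List Int) : ∀ (gs : List (Int × Nat)) (pos : Int),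
    pvLoopB ign (pvSegPairs pos gs) = pvEmit ign gs pos := by
  intro gs
  induction gs with
  | nil => intro pos; rfl
  | cons g gs ih =>
      intro pos
      obtain ⟨key, len⟩ := g
      simp only [pvSegPairs, pvLoopB, pvEmit, ih]

-- B expressed through the canonical run form
lemma pvB_eq_emit (fw ign : List Int) (h : fw ≠ []) :
    get_labels_start_end_time_alt fw ign = pvEmit ign (pvGroups fw) 0 := by
  match fw with
  | [] => exact absurd rfl h
  | x :: xs =>
      simp only [get_labels_start_end_time_alt]
      rw [PySem.List.slice_from_one]
      have hget : (PySem.List.pyGet? (x :: xs) 0).getD 0 = x := by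
        rw [PySem.List.pyGet?_zero_cons]; rfl
      simp only [hget, List.tail_cons, List.drop_succ_cons, List.drop_zero]
      have key := pvZip_eq_segPairs xs.length xs le_rfl 0 x
      have e : (0 : Int) + (1 + (xs.length : Int)) = ((x :: xs).length : Int) := by
        push_cast [List.length_cons]; ring
      rw [e] at key
      norm_num at key ⊢
      rw [key]
      exact pvLoopB_eq_emit ign (pvGroups (x :: xs)) 0

-- ===== VERDICT (by name: the statement is the Claim_ definition above) =====
theorem get_labels_start_end_time_spec : Claim_equal_get_labels_start_end_time := by
  intro fw ign _ hpre
  unfold Spec_get_labels_start_end_time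
  rw [pvA_eq_emit fw ign hpre, pvB_eq_emit fw ign hpre]
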